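-- pv_equiv track=rewrite | github.com/justiceadamsUNI/Algorithm-Designs | Knapsack Problem/knapsack_problem.py | findMostValuableKnapsackCombinations
-- ===== SOURCE A (Python) =====
-- def findMostValuableKnapsackCombinations(valid_knapsacks, values):
--     """Takes in a list of knapsack combinations and a list of item values then finds the most valuable
--        combination (or combinations) and returns them in the form of a list."""
--
--     max_value_combinations = []
--     highest_value_knapsack = 0
--
--     for knapsack_combination in valid_knapsacks:
--         value_of_knapsack = computeKnapsackValue(knapsack_combination, values)
--
--         if value_of_knapsack > highest_value_knapsack:
--             max_value_combinations = [knapsack_combination]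
--             highest_value_knapsack = value_of_knapsack
--         elif value_of_knapsack == highest_value_knapsack:
--             max_value_combinations.append(knapsack_combination)
--
--     return max_value_combinations
--
-- def computeKnapsackValue(knapsack, values):
--     """Takes in a knapsack combination and a list of corresponding values. Returns the value of the given
--        knapsack combination."""
--
--     total_value = 0
--     for item in knapsack:
--         total_value += values[item]
--     return total_value
-- ===== SOURCE B (Python) =====
-- def findMostValuableKnapsackCombinations(valid_knapsacks, values):
--     """Build-table-then-filter: compute all combination values once, take the
--        0-seeded maximum, and keep the combinations that reach it (in order)."""
--     vals = [sum(values[i] for i in combo) for combo in valid_knapsacks]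
--     threshold = max([0] + vals)
--     return [combo for combo, v in zip(valid_knapsacks, vals) if v == threshold]
-- ===== Notes on version B (the rewrite author's own statement) =====
-- stated objective: simpler
-- what changed: Replaces the incremental max-with-reset accumulator loop by a build-table-then-filter decomposition: compute all combination values, take the 0-seeded maximum, filter the combinations reaching it.
import Mathlib
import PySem

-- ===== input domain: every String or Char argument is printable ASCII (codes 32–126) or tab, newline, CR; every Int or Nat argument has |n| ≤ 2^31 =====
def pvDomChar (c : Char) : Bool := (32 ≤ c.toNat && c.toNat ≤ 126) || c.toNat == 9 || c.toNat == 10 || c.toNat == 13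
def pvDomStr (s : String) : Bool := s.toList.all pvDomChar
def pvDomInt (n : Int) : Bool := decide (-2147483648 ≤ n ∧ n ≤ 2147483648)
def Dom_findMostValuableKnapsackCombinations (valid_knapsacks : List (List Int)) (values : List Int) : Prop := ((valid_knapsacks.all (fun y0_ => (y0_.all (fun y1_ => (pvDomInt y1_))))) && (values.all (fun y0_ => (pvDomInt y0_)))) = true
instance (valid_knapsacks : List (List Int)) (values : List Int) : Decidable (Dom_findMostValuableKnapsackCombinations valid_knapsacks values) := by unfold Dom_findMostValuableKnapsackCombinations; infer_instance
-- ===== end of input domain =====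

-- B replaces A's incremental max-with-reset loop by build-table-then-filter (same cost, simpler).

-- ===== PORT A =====
-- values[item]: pyGet? is exact; the .getD 0 fallback is only reached outside Pre_ (IndexError in Python)
def computeKnapsackValue (knapsack : List Int) (values : List Int) : Int :=
  knapsack.foldl (fun total item => total + (PySem.List.pyGet? values item).getD 0) 0

def findMostValuableKnapsackCombinations (valid_knapsacks : List (List Int)) (values : List Int) : List (List Int) :=
  (valid_knapsacks.foldl
    (fun (st : List (List Int) × Int) kc =>
      let v := computeKnapsackValue kc values
      if v > st.2 then ([kc], v)
      else if v = st.2 then (st.1 ++ [kc], st.2)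
      else st)
    ([], 0)).1

-- ===== PORT B =====
def knapsackValueB (values : List Int) (combo : List Int) : Int :=
  (combo.map (fun i => (PySem.List.pyGet? values i).getD 0)).sum

def findMostValuableKnapsackCombinations_alt (valid_knapsacks : List (List Int)) (values : List Int) : List (List Int) :=
  let vals := valid_knapsacks.map (knapsackValueB values)
  let threshold := vals.foldl max 0
  ((valid_knapsacks.zip vals).filter (fun p => decide (p.2 = threshold))).map Prod.fst

-- ===== PRECONDITION & SPEC =====
-- Pre_ excludes exactly the inputs where Python's values[item] raises IndexError
def Pre_findMostValuableKnapsackCombinations (valid_knapsacks : List (List Int)) (values : List Int) : Prop :=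
  ∀ kc ∈ valid_knapsacks, ∀ i ∈ kc, PySem.Raise.InRange values.length i
instance (valid_knapsacks : List (List Int)) (values : List Int) : Decidable (Pre_findMostValuableKnapsackCombinations valid_knapsacks values) := by unfold Pre_findMostValuableKnapsackCombinations; infer_instance
def pvWitness_findMostValuableKnapsackCombinations : List (List Int) × List Int := ([[0, 1], [2], [1, 1]], [3, 5, 8])

def Spec_findMostValuableKnapsackCombinations (valid_knapsacks : List (List Int)) (values : List Int) (out : List (List Int)) : Prop := out = findMostValuableKnapsackCombinations_alt valid_knapsacks values
instance (valid_knapsacks : List (List Int)) (values : List Int) (out : List (List Int)) : Decidable (Spec_findMostValuableKnapsackCombinations valid_knapsacks values out) := by unfold Spec_findMostValuableKnapsackCombinations; infer_instance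

-- ===== CLAIM (what is proved, stated in full; the proofs are below) =====
def Claim_equal_findMostValuableKnapsackCombinations : Prop := ∀ (valid_knapsacks : List (List Int)) (values : List Int), Dom_findMostValuableKnapsackCombinations valid_knapsacks values → Pre_findMostValuableKnapsackCombinations valid_knapsacks values → Spec_findMostValuableKnapsackCombinations valid_knapsacks values (findMostValuableKnapsackCombinations valid_knapsacks values)

-- ===== LEMMAS AND PROOFS =====

-- the two per-combination value functions agree
lemma foldl_add_getD (values : List Int) (kc : List Int) :
    ∀ a : Int, kc.foldl (fun total item => total + (PySem.List.pyGet? values item).getD 0) a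
      = a + (kc.map (fun i => (PySem.List.pyGet? values i).getD 0)).sum := by
  induction kc with
  | nil => intro a; simp
  | cons x xs ih => intro a; simp [List.foldl, ih]; ring

lemma val_eq (values : List Int) (kc : List Int) :
    computeKnapsackValue kc values = knapsackValueB values kc := by
  simp [computeKnapsackValue, knapsackValueB, foldl_add_getD]

lemma le_foldl_max (l : List Int) : ∀ h : Int, h ≤ l.foldl max h := by
  induction l with
  | nil => intro h; simp
  | cons x xs ih => intro h; exact le_trans (le_max_left h x) (ih (max h x))

-- characterisation of A's loop: final state is the filter at the running maximum
lemma loopA (values : List Int) (xs : List (List Int)) :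
    ∀ (acc : List (List Int)) (h : Int),
      xs.foldl
        (fun (st : List (List Int) × Int) kc =>
          let v := computeKnapsackValue kc values
          if v > st.2 then ([kc], v)
          else if v = st.2 then (st.1 ++ [kc], st.2)
          else st)
        (acc, h)
      = ((if (xs.map (fun c => computeKnapsackValue c values)).foldl max h = h then acc else [])
          ++ xs.filter (fun c => decide (computeKnapsackValue c values = (xs.map (fun c => computeKnapsackValue c values)).foldl max h)),
         (xs.map (fun c => computeKnapsackValue c values)).foldl max h) := by
  induction xs with
  | nil => intro acc h; simp
  | cons c xs ih =>
    intro acc h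
    simp only [List.foldl_cons, List.map_cons]
    by_cases h1 : computeKnapsackValue c values > h
    · rw [if_pos h1]
      have hmax : max h (computeKnapsackValue c values) = computeKnapsackValue c values := by omega
      simp only [hmax]
      rw [ih [c] (computeKnapsackValue c values)]
      have hge := le_foldl_max (xs.map (fun c => computeKnapsackValue c values)) (computeKnapsackValue c values)
      have hne : (xs.map (fun c => computeKnapsackValue c values)).foldl max (computeKnapsackValue c values) ≠ h := by omega
      rw [if_neg hne, List.filter_cons]
      by_cases h2 : computeKnapsackValue c values = (xs.map (fun c => computeKnapsackValue c values)).foldl max (computeKnapsackValue c values)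
      · rw [if_pos h2.symm]
        rw [if_pos (decide_eq_true h2)]
        simp
      · rw [if_neg (fun e => h2 e.symm)]
        simp [h2]
    · rw [if_neg h1]
      by_cases h2 : computeKnapsackValue c values = h
      · rw [if_pos h2]
        have hmax : max h (computeKnapsackValue c values) = h := by omega
        simp only [hmax]
        rw [ih (acc ++ [c]) h, List.filter_cons]
        by_cases h3 : (xs.map (fun c => computeKnapsackValue c values)).foldl max h = h
        · rw [if_pos h3, if_pos h3]
          simp [h2, h3, List.append_assoc]
        · rw [if_neg h3, if_neg h3]
          have : ¬ (computeKnapsackValue c values = (xs.map (fun c => computeKnapsackValue c values)).foldl max h) := by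
            rw [h2]; exact fun e => h3 e.symm
          simp [this]
      · rw [if_neg h2]
        have hmax : max h (computeKnapsackValue c values) = h := by omega
        simp only [hmax]
        rw [ih acc h, List.filter_cons]
        have hge := le_foldl_max (xs.map (fun c => computeKnapsackValue c values)) h
        have : ¬ (computeKnapsackValue c values = (xs.map (fun c => computeKnapsackValue c values)).foldl max h) := by omega
        simp [this]

-- B's zip-filter-map equals a plain filter over the list
lemma zip_map_filter (g : List Int → Int) (t : Int) (l : List (List Int)) :
    ((l.zip (l.map g)).filter (fun p => decide (p.2 = t))).map Prod.fst
      = l.filter (fun c => decide (g c = t)) := by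
  induction l with
  | nil => simp
  | cons x xs ih =>
    simp only [List.map_cons, List.zip_cons_cons, List.filter_cons]
    by_cases h : g x = t
    · simp [h, ih]
    · simp [h, ih]

-- ===== VERDICT (by name: the statement is the Claim_ definition above) =====
theorem findMostValuableKnapsackCombinations_spec : Claim_equal_findMostValuableKnapsackCombinations := by
  intro vk values _ _
  unfold Spec_findMostValuableKnapsackCombinations findMostValuableKnapsackCombinations
    findMostValuableKnapsackCombinations_alt
  have hmap : vk.map (knapsackValueB values) = vk.map (fun c => computeKnapsackValue c values) := by
    simp [val_eq]
  rw [loopA values vk [] 0]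
  simp only [hmap]
  rw [zip_map_filter (fun c => computeKnapsackValue c values)]
  have h0 : (if (vk.map (fun c => computeKnapsackValue c values)).foldl max 0 = 0
      then ([] : List (List Int)) else []) = [] := by split <;> rfl
  rw [h0, List.nil_append]
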